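-- pv_equiv track=rewrite | github.com/HarishParamathmananda97/Problem_Solving | hackerrank_daily_challenges/encryption_decryption.py | encryptPassword
-- ===== SOURCE A (Python) =====
-- def encryptPassword(s):
--     i, n = 0, len(s)
--     encrypted_s = []
--     while i < n:
--         if i + 1 < n and s[i].islower() and s[i + 1].isupper():
--             encrypted_s.append(s[i + 1])
--             encrypted_s.append(s[i])
--             encrypted_s.append('*')
--             i += 2
--         elif s[i].isdigit():
--             encrypted_s.insert(0, s[i])
--             encrypted_s.append('0')
--             i += 1
--         else:
--             encrypted_s.append(s[i])
--             i += 1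
--
--     return ''.join(encrypted_s)
-- ===== SOURCE B (Python) =====
-- def encryptPassword(s):
--     # Pass 1: collect digits (they end up reversed in front) and build a
--     # masked string where each digit becomes '0'.
--     digits = []
--     masked = []
--     for c in s:
--         if c.isdigit():
--             digits.append(c)
--             masked.append('0')
--         else:
--             masked.append(c)
--     # Pass 2: apply the lower/UPPER swap rule over the masked string.
--     out = []
--     i = 0
--     while i < len(masked):
--         if i + 1 < len(masked) and masked[i].islower() and masked[i + 1].isupper():
--             out.append(masked[i + 1])
--             out.append(masked[i])
--             out.append('*')
--             i += 2
--         else: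
--             out.append(masked[i])
--             i += 1
--     return ''.join(reversed(digits)) + ''.join(out)
-- ===== Notes on version B (the rewrite author's own statement) =====
-- stated objective: alternative
-- what changed: Replaces A's single interleaved loop with front-insertions for digits by two sequential passes: pass 1 extracts the digits into a separate list and masks their positions, pass 2 applies only the pairing rule; the result is reversed(digits) + pass2 output.
import Mathlib
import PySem

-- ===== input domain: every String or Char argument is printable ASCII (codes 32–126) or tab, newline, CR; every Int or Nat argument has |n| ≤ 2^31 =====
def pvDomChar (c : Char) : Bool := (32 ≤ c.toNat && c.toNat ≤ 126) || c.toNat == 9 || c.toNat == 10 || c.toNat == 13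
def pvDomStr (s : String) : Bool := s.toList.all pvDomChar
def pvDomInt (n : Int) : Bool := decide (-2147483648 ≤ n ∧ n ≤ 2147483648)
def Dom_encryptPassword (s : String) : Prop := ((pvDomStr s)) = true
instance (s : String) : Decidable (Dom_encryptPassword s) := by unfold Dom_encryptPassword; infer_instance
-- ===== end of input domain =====

-- B replaces A's single loop (which insert(0)s each digit into the growing buffer)
-- by two sequential passes: digits pulled out and masked to '0', then the pairing rule.

-- ===== PORT A =====
-- A's while loop over index i, transliterated as recursion on the remaining suffix;
-- acc is encrypted_s (append at the end, insert(0) at the front).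
def pvEncA : List Char → List Char → List Char
  | acc, [] => acc
  | acc, [c1] =>
      if PySem.Chars.isdigit c1 then c1 :: (acc ++ ['0']) else acc ++ [c1]
  | acc, c1 :: c2 :: rest =>
      if PySem.Chars.islower c1 && PySem.Chars.isupper c2 then
        pvEncA (acc ++ [c2, c1, '*']) rest
      else if PySem.Chars.isdigit c1 then
        pvEncA (c1 :: (acc ++ ['0'])) (c2 :: rest)
      else
        pvEncA (acc ++ [c1]) (c2 :: rest)

def encryptPassword (s : String) : String := String.ofList (pvEncA [] s.toList)

-- ===== PORT B =====
-- Pass 1 of Source B: one fold building (digits, masked).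
def pvPass1 (cs : List Char) : List Char × List Char :=
  cs.foldl
    (fun st c =>
      if PySem.Chars.isdigit c then (st.1 ++ [c], st.2 ++ ['0'])
      else (st.1, st.2 ++ [c]))
    ([], [])

-- Pass 2 of Source B: the pairing rule over the masked string.
def pvPass2 : List Char → List Char
  | [] => []
  | [c1] => [c1]
  | c1 :: c2 :: rest =>
      if PySem.Chars.islower c1 && PySem.Chars.isupper c2 then
        c2 :: c1 :: '*' :: pvPass2 rest
      else
        c1 :: pvPass2 (c2 :: rest)

def encryptPassword_alt (s : String) : String :=
  let p := pvPass1 s.toList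
  String.ofList (p.1.reverse ++ pvPass2 p.2)

-- ===== PRECONDITION & SPEC =====
def Spec_encryptPassword (s : String) (out : String) : Prop := out = encryptPassword_alt s
instance (s : String) (out : String) : Decidable (Spec_encryptPassword s out) := by unfold Spec_encryptPassword; infer_instance

-- ===== CLAIM (what is proved, stated in full; the proofs are below) =====
def Claim_equal_encryptPassword : Prop := ∀ (s : String), Dom_encryptPassword s → Spec_encryptPassword s (encryptPassword s)

-- ===== LEMMAS AND PROOFS =====

-- digit substitution performed by pass 1
def pvSubst (c : Char) : Char := if PySem.Chars.isdigit c then '0' else c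

theorem pv_not_lower_of_digit (c : Char) (h : PySem.Chars.isdigit c = true) :
    PySem.Chars.islower c = false := by
  simp only [PySem.Chars.isdigit, PySem.Chars.islower, Bool.and_eq_true, Bool.and_eq_false_iff,
    decide_eq_true_eq, decide_eq_false_iff_not, not_le, Char.le_def,
    UInt32.le_iff_toNat_le] at h ⊢
  have h0 : ('0'.val.toNat) = 48 := rfl
  have h9 : ('9'.val.toNat) = 57 := rfl
  have ha : ('a'.val.toNat) = 97 := rfl
  have hz : ('z'.val.toNat) = 122 := rfl
  omega

theorem pv_not_upper_of_digit (c : Char) (h : PySem.Chars.isdigit c = true) :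
    PySem.Chars.isupper c = false := by
  simp only [PySem.Chars.isdigit, PySem.Chars.isupper, Bool.and_eq_true, Bool.and_eq_false_iff,
    decide_eq_true_eq, decide_eq_false_iff_not, not_le, Char.le_def,
    UInt32.le_iff_toNat_le] at h ⊢
  have h0 : ('0'.val.toNat) = 48 := rfl
  have h9 : ('9'.val.toNat) = 57 := rfl
  have hA : ('A'.val.toNat) = 65 := rfl
  have hZ : ('Z'.val.toNat) = 90 := rfl
  omega

theorem pv_islower_subst (c : Char) : PySem.Chars.islower (pvSubst c) = PySem.Chars.islower c := by
  unfold pvSubst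
  split
  · next h => rw [pv_not_lower_of_digit c h]; decide
  · rfl

theorem pv_isupper_subst (c : Char) : PySem.Chars.isupper (pvSubst c) = PySem.Chars.isupper c := by
  unfold pvSubst
  split
  · next h => rw [pv_not_upper_of_digit c h]; decide
  · rfl

theorem pv_subst_of_not_digit (c : Char) (h : PySem.Chars.isdigit c = false) : pvSubst c = c := by
  simp [pvSubst, h]

theorem pv_not_digit_of_lower (c : Char) (h : PySem.Chars.islower c = true) :
    PySem.Chars.isdigit c = false := by
  cases hd : PySem.Chars.isdigit c
  · rfl
  · rw [pv_not_lower_of_digit c hd] at h; exact absurd h (by simp)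

theorem pv_not_digit_of_upper (c : Char) (h : PySem.Chars.isupper c = true) :
    PySem.Chars.isdigit c = false := by
  cases hd : PySem.Chars.isdigit c
  · rfl
  · rw [pv_not_upper_of_digit c hd] at h; exact absurd h (by simp)

theorem pvPass2_pair (c1 c2 : Char) (l : List Char)
    (h : (PySem.Chars.islower c1 && PySem.Chars.isupper c2) = true) :
    pvPass2 (c1 :: c2 :: l) = c2 :: c1 :: '*' :: pvPass2 l := by
  rw [pvPass2, if_pos h]

theorem pvPass2_nopair (c1 c2 : Char) (l : List Char)
    (h : (PySem.Chars.islower c1 && PySem.Chars.isupper c2) = false) :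
    pvPass2 (c1 :: c2 :: l) = c1 :: pvPass2 (c2 :: l) := by
  rw [pvPass2, if_neg (by simp [h])]

-- A's loop from any accumulator: reversed digits go in front, the pairing body behind.
theorem pvEncA_eq (l acc : List Char) :
    pvEncA acc l = (l.filter PySem.Chars.isdigit).reverse ++ acc ++ pvPass2 (l.map pvSubst) := by
  induction l using pvPass2.induct generalizing acc with
  | case1 => simp [pvEncA, pvPass2]
  | case2 c1 =>
    by_cases h : PySem.Chars.isdigit c1 = true
    · simp [pvEncA, pvPass2, pvSubst, h, List.filter]
    · simp [pvEncA, pvPass2, pvSubst, h, List.filter]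
  | case3 c1 c2 rest hpair ih =>
    obtain ⟨hl, hu⟩ := Bool.and_eq_true .. ▸ hpair
    have h1 : PySem.Chars.isdigit c1 = false := pv_not_digit_of_lower c1 hl
    have h2 : PySem.Chars.isdigit c2 = false := pv_not_digit_of_upper c2 hu
    rw [pvEncA, if_pos hpair, ih]
    rw [List.map_cons, List.map_cons, pv_subst_of_not_digit c1 h1, pv_subst_of_not_digit c2 h2,
      pvPass2_pair c1 c2 _ hpair]
    simp [List.filter, h1, h2]
  | case4 c1 c2 rest hpair ih =>
    have hpair' : (PySem.Chars.islower (pvSubst c1) && PySem.Chars.isupper (pvSubst c2)) = false := by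
      rw [pv_islower_subst, pv_isupper_subst]
      exact Bool.not_eq_true _ ▸ hpair
    by_cases hd : PySem.Chars.isdigit c1 = true
    · rw [pvEncA, if_neg hpair, if_pos hd, ih]
      simp only [List.map_cons]
      rw [pvPass2_nopair (pvSubst c1) (pvSubst c2) _ hpair']
      simp [List.filter, hd, pvSubst]
    · have hdf : PySem.Chars.isdigit c1 = false := by simpa using hd
      rw [pvEncA, if_neg hpair, if_neg hd, ih]
      simp only [List.map_cons]
      rw [pvPass2_nopair (pvSubst c1) (pvSubst c2) _ hpair']
      simp [List.filter, hdf, pvSubst]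

-- B's pass 1 computes (digits in order, masked string).
theorem pvPass1_eq (cs : List Char) :
    pvPass1 cs = (cs.filter PySem.Chars.isdigit, cs.map pvSubst) := by
  suffices h : ∀ (d m : List Char),
      cs.foldl
        (fun st c =>
          if PySem.Chars.isdigit c then (st.1 ++ [c], st.2 ++ ['0'])
          else (st.1, st.2 ++ [c]))
        (d, m) = (d ++ cs.filter PySem.Chars.isdigit, m ++ cs.map pvSubst) by
    simpa using h [] []
  induction cs with
  | nil => simp
  | cons c rest ih =>
    intro d m
    by_cases hd : PySem.Chars.isdigit c = true
    · simp [List.filter, pvSubst, hd, ih]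
    · simp [List.filter, pvSubst, hd, ih]

-- ===== VERDICT (by name: the statement is the Claim_ definition above) =====
theorem encryptPassword_spec : Claim_equal_encryptPassword := by
  intro s _
  unfold Spec_encryptPassword encryptPassword encryptPassword_alt
  rw [pvEncA_eq, pvPass1_eq]
  simp
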